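-- pv_equiv track=rewrite | github.com/therealjamesjung/AlgorithmStudy | week_Kakao/2022, 2021 TECH INTERNSHIP/james_p81302.py | dfs
-- ===== SOURCE A (Python) =====
-- def dfs(place, row, col, depth, start_r, start_c):
--     if row == start_r and col == start_c and depth > 0:
--         return True
--     if row > 4 or col > 4 or row < 0 or col < 0 or depth == 3 or place[row][col] == 'X':
--         return True
--     if place[row][col] == 'P' and depth > 0:
--         return False
--     return dfs(place, row + 1, col, depth + 1, start_r, start_c) and \
--         dfs(place, row, col + 1, depth + 1, start_r, start_c) and \
--         dfs(place, row - 1, col, depth + 1, start_r, start_c) and \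
--         dfs(place, row, col - 1, depth + 1, start_r, start_c)
-- ===== SOURCE B (Python) =====
-- def dfs(place, row, col, depth, start_r, start_c):
--     # Explicit stack-based DFS: same terminal checks, early False on a too-close 'P',
--     # True once the whole bounded frontier is exhausted (no call stack, no short-circuit 'and').
--     stack = [(row, col, depth)]
--     while stack:
--         r, c, d = stack.pop()
--         if r == start_r and c == start_c and d > 0:
--             continue
--         if r > 4 or c > 4 or r < 0 or c < 0 or d == 3 or place[r][c] == 'X':
--             continue
--         if place[r][c] == 'P' and d > 0:
--             return False
--         stack.append((r + 1, c, d + 1))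
--         stack.append((r, c + 1, d + 1))
--         stack.append((r - 1, c, d + 1))
--         stack.append((r, c - 1, d + 1))
--     return True
-- ===== Notes on version B (the rewrite author's own statement) =====
-- stated objective: alternative
-- what changed: The 4-way recursion with short-circuit 'and' is replaced by an explicit stack-driven iteration (no call stack): pop a cell, apply the same terminal checks, return False immediately on a too-close 'P', push the four neighbours, and return True when the stack empties.
-- outside the precondition, e.g. on dfs(['OX', 'XX'], 0, 0, 0, 9, 9): A returns True, B returns True; on dfs(['OOOOO', 'OOOOO', 'OOOOO', 'OOOOO', 'OOOOO'], 0, 0, -1, 9, 9): A returns True, B returns True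
import Mathlib
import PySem

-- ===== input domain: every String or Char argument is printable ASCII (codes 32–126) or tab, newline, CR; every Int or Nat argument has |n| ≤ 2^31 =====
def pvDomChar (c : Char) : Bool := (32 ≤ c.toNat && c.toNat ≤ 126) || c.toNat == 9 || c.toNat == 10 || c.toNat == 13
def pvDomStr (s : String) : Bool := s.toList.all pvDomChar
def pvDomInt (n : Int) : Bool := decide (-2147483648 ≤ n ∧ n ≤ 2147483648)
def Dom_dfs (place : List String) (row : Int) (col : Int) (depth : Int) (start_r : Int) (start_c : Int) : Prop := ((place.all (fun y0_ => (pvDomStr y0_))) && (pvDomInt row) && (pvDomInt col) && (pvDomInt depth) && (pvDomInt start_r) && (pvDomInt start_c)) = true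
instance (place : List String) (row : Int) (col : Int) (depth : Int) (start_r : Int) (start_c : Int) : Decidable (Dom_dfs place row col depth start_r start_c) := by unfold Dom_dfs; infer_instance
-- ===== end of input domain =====

-- B replaces the 4-way short-circuit recursion by an explicit stack-based DFS with the same
-- terminal checks (alternative decomposition, no call stack; same asymptotic cost).


-- ===== PORT A =====
-- place[row][col] as an Option (none = IndexError); only compared under the in-bounds guards,
-- exactly where Python evaluates it.
def cellAt (place : List String) (r c : Int) : Option Char :=
  (PySem.List.pyGet? place r).bind (fun s => PySem.Str.pyGet? s c)

-- Python's recursion is bounded only by the `depth == 3` cut; the fuel (3-depth).toNat counts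
-- exactly the increments until that cut, so inside Pre_ the fuel never runs out.
def dfsA (place : List String) (start_r start_c : Int) : Nat → Int → Int → Int → Bool
  | fuel, row, col, depth =>
    if row = start_r ∧ col = start_c ∧ 0 < depth then true
    else if 4 < row ∨ 4 < col ∨ row < 0 ∨ col < 0 ∨ depth = 3 ∨ cellAt place row col = some 'X' then true
    else if cellAt place row col = some 'P' ∧ 0 < depth then false
    else match fuel with
      | 0 => true
      | fuel' + 1 =>
        dfsA place start_r start_c fuel' (row + 1) col (depth + 1) &&
        dfsA place start_r start_c fuel' row (col + 1) (depth + 1) &&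
        dfsA place start_r start_c fuel' (row - 1) col (depth + 1) &&
        dfsA place start_r start_c fuel' row (col - 1) (depth + 1)

def dfs (place : List String) (row : Int) (col : Int) (depth : Int) (start_r : Int) (start_c : Int) : Bool :=
  dfsA place start_r start_c (3 - depth).toNat row col depth

-- ===== PORT B =====
-- 1 + 4 + 4^2 + … : an upper bound on the number of pops the stack loop can make.
def sizeBound : Nat → Nat
  | 0 => 1
  | n + 1 => 1 + 4 * sizeBound n

-- the while-stack loop of Source B; the list head is the top of the stack (Python pops from the end,
-- so the last-appended neighbour (r, c-1) is consed first).
def loopB (place : List String) (start_r start_c : Int) : Nat → List (Int × Int × Int) → Bool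
  | _, [] => true
  | 0, _ :: _ => true
  | fuel + 1, (r, c, d) :: rest =>
    if r = start_r ∧ c = start_c ∧ 0 < d then loopB place start_r start_c fuel rest
    else if 4 < r ∨ 4 < c ∨ r < 0 ∨ c < 0 ∨ d = 3 ∨ cellAt place r c = some 'X' then loopB place start_r start_c fuel rest
    else if cellAt place r c = some 'P' ∧ 0 < d then false
    else loopB place start_r start_c fuel
      ((r, c - 1, d + 1) :: (r - 1, c, d + 1) :: (r, c + 1, d + 1) :: (r + 1, c, d + 1) :: rest)

-- fuel: a pop-count bound; capped at min … 3 so it is cheap to compute for any Int depth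
-- (inside Pre_ the loop only ever recurses from 0 ≤ depth ≤ 3, where the cap is inactive)
def dfs_alt (place : List String) (row : Int) (col : Int) (depth : Int) (start_r : Int) (start_c : Int) : Bool :=
  loopB place start_r start_c (sizeBound (min (3 - depth).toNat 3)) [(row, col, depth)]

-- ===== PRECONDITION & SPEC =====
-- Pre_ keeps inputs that terminate before any grid access, start on an 'X'/'P' cell, or supply a
-- full 5x5 grid with recursion counter 0 ≤ depth ≤ 3; it excludes smaller/ragged grids on which
-- avoiding an IndexError depends on the course of the recursive exploration, and depths outside
-- [0,3] on which A can recurse without bound (RecursionError) — just outside this closed form A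
-- may still return (see cites).
def Pre_dfs (place : List String) (row : Int) (col : Int) (depth : Int) (start_r : Int) (start_c : Int) : Prop :=
  (row = start_r ∧ col = start_c ∧ 0 < depth)
  ∨ (4 < row ∨ 4 < col ∨ row < 0 ∨ col < 0)
  ∨ depth = 3
  ∨ (0 ≤ row ∧ row ≤ 4 ∧ 0 ≤ col ∧ col ≤ 4 ∧
      (cellAt place row col = some 'X' ∨ (cellAt place row col = some 'P' ∧ 0 < depth)))
  ∨ (0 ≤ depth ∧ depth ≤ 3 ∧ 5 ≤ place.length ∧ ∀ s ∈ place.take 5, 5 ≤ PySem.Str.len s)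

instance (place : List String) (row : Int) (col : Int) (depth : Int) (start_r : Int) (start_c : Int) : Decidable (Pre_dfs place row col depth start_r start_c) := by unfold Pre_dfs; infer_instance

def pvWitness_dfs : List String × Int × Int × Int × Int × Int :=
  (["XOOOO", "OOOOO", "OOOOO", "OOOOO", "OOOOO"], 1, 1, 0, 1, 1)

def Spec_dfs (place : List String) (row : Int) (col : Int) (depth : Int) (start_r : Int) (start_c : Int) (out : Bool) : Prop := out = dfs_alt place row col depth start_r start_c
instance (place : List String) (row : Int) (col : Int) (depth : Int) (start_r : Int) (start_c : Int) (out : Bool) : Decidable (Spec_dfs place row col depth start_r start_c out) := by unfold Spec_dfs; infer_instance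

-- ===== CLAIM (what is proved, stated in full; the proofs are below) =====
def Claim_equal_dfs : Prop := ∀ (place : List String) (row : Int) (col : Int) (depth : Int) (start_r : Int) (start_c : Int), Dom_dfs place row col depth start_r start_c → Pre_dfs place row col depth start_r start_c → Spec_dfs place row col depth start_r start_c (dfs place row col depth start_r start_c)

-- ===== LEMMAS AND PROOFS =====

-- fuel budget of one stack entry: the size of the search tree still hanging below depth d
def entryCost (d : Int) : Nat := sizeBound (3 - d).toNat

def stackCost (stack : List (Int × Int × Int)) : Nat :=
  (stack.map (fun e => entryCost e.2.2)).sum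

theorem sizeBound_pos (n : Nat) : 1 ≤ sizeBound n := by
  cases n <;> simp [sizeBound]

theorem entryCost_pos (d : Int) : 1 ≤ entryCost d := sizeBound_pos _

theorem entryCost_step (d : Int) (h : d < 3) :
    entryCost d = 1 + 4 * entryCost (d + 1) := by
  unfold entryCost
  have h3 : (3 - d).toNat = (3 - (d + 1)).toNat + 1 := by omega
  rw [h3, sizeBound]

-- an entry deeper than 3 must be terminal (it came from Pre_'s terminal disjuncts)
def OkEntry (place : List String) (start_r start_c : Int) (e : Int × Int × Int) : Prop :=
  e.2.2 ≤ 3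
  ∨ (e.1 = start_r ∧ e.2.1 = start_c ∧ 0 < e.2.2)
  ∨ (4 < e.1 ∨ 4 < e.2.1 ∨ e.1 < 0 ∨ e.2.1 < 0 ∨ e.2.2 = 3 ∨ cellAt place e.1 e.2.1 = some 'X')
  ∨ (cellAt place e.1 e.2.1 = some 'P' ∧ 0 < e.2.2)

-- the stack loop computes the conjunction of A's recursion over the stack entries
theorem loopB_eq_all (place : List String) (start_r start_c : Int) :
    ∀ (fuel : Nat) (stack : List (Int × Int × Int)),
      stackCost stack ≤ fuel →
      (∀ e ∈ stack, OkEntry place start_r start_c e) →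
      loopB place start_r start_c fuel stack
        = stack.all (fun e => dfsA place start_r start_c (3 - e.2.2).toNat e.1 e.2.1 e.2.2) := by
  intro fuel
  induction fuel with
  | zero =>
    intro stack hc _
    match stack with
    | [] => rfl
    | e :: rest =>
      exfalso
      have := entryCost_pos e.2.2
      simp [stackCost] at hc
      omega
  | succ fuel ih =>
    intro stack hc hok
    match stack with
    | [] => rfl
    | (r, c, d) :: rest =>
      have hcost : entryCost d + stackCost rest = stackCost ((r, c, d) :: rest) := by
        simp [stackCost]
      have hrest : ∀ e ∈ rest, OkEntry place start_r start_c e := fun e he => hok e (by simp [he])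
      by_cases h1 : r = start_r ∧ c = start_c ∧ 0 < d
      · have hA : dfsA place start_r start_c (3 - d).toNat r c d = true := by
          rw [dfsA.eq_def]; simp [h1]
        rw [loopB, if_pos h1, ih rest (by have := entryCost_pos d; omega) hrest]
        simp [List.all_cons, hA]
      · by_cases h2 : 4 < r ∨ 4 < c ∨ r < 0 ∨ c < 0 ∨ d = 3 ∨ cellAt place r c = some 'X'
        · have hA : dfsA place start_r start_c (3 - d).toNat r c d = true := by
            rw [dfsA.eq_def]; simp only [if_neg h1, if_pos h2]
          rw [loopB, if_neg h1, if_pos h2, ih rest (by have := entryCost_pos d; omega) hrest]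
          simp [List.all_cons, hA]
        · by_cases h3 : cellAt place r c = some 'P' ∧ 0 < d
          · have hA : dfsA place start_r start_c (3 - d).toNat r c d = false := by
              rw [dfsA.eq_def]; simp only [if_neg h1, if_neg h2, if_pos h3]
            rw [loopB, if_neg h1, if_neg h2, if_pos h3]
            simp [List.all_cons, hA]
          · -- expand: the entry is non-terminal, so by OkEntry d ≤ 3, and d ≠ 3, so d < 3
            have hd3 : d < 3 := by
              have := hok (r, c, d) (by simp)
              unfold OkEntry at this
              simp only at this
              rcases this with h | h | h | h
              · omega
              · exact absurd h h1
              · exact absurd h h2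
              · exact absurd h h3
            have hstep := entryCost_step d hd3
            have hok' : ∀ e ∈ ((r, c - 1, d + 1) :: (r - 1, c, d + 1) :: (r, c + 1, d + 1) :: (r + 1, c, d + 1) :: rest), OkEntry place start_r start_c e := by
              intro e he
              simp only [List.mem_cons] at he
              rcases he with rfl | rfl | rfl | rfl | he
              · exact Or.inl (show (d : Int) + 1 ≤ 3 by omega)
              · exact Or.inl (show (d : Int) + 1 ≤ 3 by omega)
              · exact Or.inl (show (d : Int) + 1 ≤ 3 by omega)
              · exact Or.inl (show (d : Int) + 1 ≤ 3 by omega)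
              · exact hrest e he
            have hc' : stackCost ((r, c - 1, d + 1) :: (r - 1, c, d + 1) :: (r, c + 1, d + 1) :: (r + 1, c, d + 1) :: rest) ≤ fuel := by
              simp [stackCost] at hc ⊢
              omega
            rw [loopB, if_neg h1, if_neg h2, if_neg h3, ih _ hc' hok']
            have hfuel : (3 - d).toNat = (3 - (d + 1)).toNat + 1 := by omega
            have hA : dfsA place start_r start_c (3 - d).toNat r c d
                = (dfsA place start_r start_c (3 - (d + 1)).toNat (r + 1) c (d + 1) &&
                   dfsA place start_r start_c (3 - (d + 1)).toNat r (c + 1) (d + 1) &&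
                   dfsA place start_r start_c (3 - (d + 1)).toNat (r - 1) c (d + 1) &&
                   dfsA place start_r start_c (3 - (d + 1)).toNat r (c - 1) (d + 1)) := by
              rw [dfsA.eq_def]
              simp only [if_neg h1, if_neg h2, if_neg h3, hfuel]
            simp only [List.all_cons, hA]
            generalize dfsA place start_r start_c (3 - (d + 1)).toNat (r + 1) c (d + 1) = b1
            generalize dfsA place start_r start_c (3 - (d + 1)).toNat r (c + 1) (d + 1) = b2
            generalize dfsA place start_r start_c (3 - (d + 1)).toNat (r - 1) c (d + 1) = b3
            generalize dfsA place start_r start_c (3 - (d + 1)).toNat r (c - 1) (d + 1) = b4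
            generalize (rest.all fun e => dfsA place start_r start_c (3 - e.2.2).toNat e.1 e.2.1 e.2.2) = brest
            cases b1 <;> cases b2 <;> cases b3 <;> cases b4 <;> cases brest <;> rfl

-- a start cell on which one of the three terminal checks fires is decided in one pop / one
-- unfold, with any fuel ≥ 1 on the loop side and any fuel on the recursion side
theorem terminal_agree (place : List String) (start_r start_c r c d : Int)
    (fuelB fuelA : Nat) (hf : 1 ≤ fuelB)
    (ht : (r = start_r ∧ c = start_c ∧ 0 < d)
        ∨ (4 < r ∨ 4 < c ∨ r < 0 ∨ c < 0 ∨ d = 3 ∨ cellAt place r c = some 'X')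
        ∨ (cellAt place r c = some 'P' ∧ 0 < d)) :
    dfsA place start_r start_c fuelA r c d = loopB place start_r start_c fuelB [(r, c, d)] := by
  obtain ⟨fuelB', rfl⟩ : ∃ k, fuelB = k + 1 := ⟨fuelB - 1, by omega⟩
  by_cases h1 : r = start_r ∧ c = start_c ∧ 0 < d
  · rw [dfsA.eq_def, loopB]
    simp [h1, loopB]
  · by_cases h2 : 4 < r ∨ 4 < c ∨ r < 0 ∨ c < 0 ∨ d = 3 ∨ cellAt place r c = some 'X'
    · rw [dfsA.eq_def, loopB]
      simp only [if_neg h1, if_pos h2, loopB]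
    · have h3 : cellAt place r c = some 'P' ∧ 0 < d := by tauto
      rw [dfsA.eq_def, loopB]
      simp only [if_neg h1, if_neg h2, if_pos h3]

-- ===== VERDICT (by name: the statement is the Claim_ definition above) =====
theorem dfs_spec : Claim_equal_dfs := by
  intro place row col depth start_r start_c _ hpre
  unfold Spec_dfs dfs dfs_alt
  unfold Pre_dfs at hpre
  have hfb : 1 ≤ sizeBound (min (3 - depth).toNat 3) := sizeBound_pos _
  rcases hpre with h | h | h | h | h
  · exact terminal_agree _ _ _ _ _ _ _ _ hfb (Or.inl h)
  · exact terminal_agree _ _ _ _ _ _ _ _ hfb (Or.inr (Or.inl (by tauto)))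
  · exact terminal_agree _ _ _ _ _ _ _ _ hfb (Or.inr (Or.inl (by tauto)))
  · rcases h.2.2.2.2 with hx | hp
    · exact terminal_agree _ _ _ _ _ _ _ _ hfb (Or.inr (Or.inl (by tauto)))
    · exact terminal_agree _ _ _ _ _ _ _ _ hfb (Or.inr (Or.inr hp))
  · -- full 5x5 grid with 0 ≤ depth ≤ 3: the cap is inactive and the cost bound is exact
    have hmin : min (3 - depth).toNat 3 = (3 - depth).toNat := by omega
    rw [hmin, loopB_eq_all place start_r start_c (sizeBound (3 - depth).toNat) [(row, col, depth)]
        (by simp [stackCost, entryCost]) (by intro e he; simp at he; subst he; exact Or.inl h.2.1)]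
    simp [List.all_cons]
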